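-- pv_equiv track=rewrite | github.com/mattpower-ux/greenbuilder_bot_mvp | app/main.py | _find_chunk_for_source
-- ===== SOURCE A (Python) =====
-- from typing import Any, List
--
-- def _find_chunk_for_source(source: dict[str, Any], chunks: list[dict[str, Any]]) -> dict[str, Any]:
--     url = str(source.get("url", ""))
--     title = str(source.get("title", ""))
--     pdf_filename = str(source.get("pdf_filename", ""))
--
--     for chunk in chunks:
--         chunk_url = str(chunk.get("url", ""))
--         chunk_pdf = str(chunk.get("pdf_filename", ""))
--         if url and chunk_url == url:
--             return chunk
--         if pdf_filename and chunk_pdf == pdf_filename: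
--             return chunk
--
--     for chunk in chunks:
--         if title and title in str(chunk.get("title", "")):
--             return chunk
--     return {}
-- ===== SOURCE B (Python) =====
-- def _find_chunk_for_source(source, chunks):
--     url = str(source.get("url", ""))
--     title = str(source.get("title", ""))
--     pdf_filename = str(source.get("pdf_filename", ""))
--
--     title_match = None
--     for chunk in chunks:
--         if url and str(chunk.get("url", "")) == url:
--             return chunk
--         if pdf_filename and str(chunk.get("pdf_filename", "")) == pdf_filename:
--             return chunk
--         if title_match is None and title and title in str(chunk.get("title", "")):
--             title_match = chunk
--     return title_match if title_match is not None else {}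
-- ===== Notes on version B (the rewrite author's own statement) =====
-- stated objective: alternative
-- what changed: Collapses A's two sequential scans (url/pdf pass, then title pass) into a single pass that returns url/pdf matches immediately and records the first title match in a variable returned after the loop.
import Mathlib
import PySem

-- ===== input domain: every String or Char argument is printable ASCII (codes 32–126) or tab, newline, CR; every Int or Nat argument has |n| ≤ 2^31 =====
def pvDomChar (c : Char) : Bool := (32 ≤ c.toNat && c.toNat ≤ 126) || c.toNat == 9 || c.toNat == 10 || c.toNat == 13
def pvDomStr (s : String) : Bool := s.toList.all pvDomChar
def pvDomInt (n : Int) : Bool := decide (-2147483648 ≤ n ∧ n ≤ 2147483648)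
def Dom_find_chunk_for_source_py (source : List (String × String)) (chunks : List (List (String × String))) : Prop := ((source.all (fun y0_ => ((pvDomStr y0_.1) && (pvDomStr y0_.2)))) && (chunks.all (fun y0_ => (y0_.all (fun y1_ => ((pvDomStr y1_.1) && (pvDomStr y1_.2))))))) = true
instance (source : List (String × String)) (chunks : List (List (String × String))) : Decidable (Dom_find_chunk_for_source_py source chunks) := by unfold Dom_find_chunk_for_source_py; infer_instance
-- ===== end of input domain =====

-- One honest line: B folds A's two passes into one pass that keeps the first title
-- candidate in a variable while still returning url/pdf matches immediately (alternative decomposition, same cost).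

-- ===== PORT A =====
-- d.get(k, "") on a dict given as an association list
def pvGetS (d : List (String × String)) (k : String) : String :=
  PySem.Dict.getD (PySem.Dict.mk d) k ""

-- first for-loop of A: url/pdf match
def pvLoop1 (url pdf : String) : List (List (String × String)) → Option (List (String × String))
  | [] => none
  | chunk :: rest =>
    let chunk_url := pvGetS chunk "url"
    let chunk_pdf := pvGetS chunk "pdf_filename"
    if url ≠ "" ∧ chunk_url = url then some chunk
    else if pdf ≠ "" ∧ chunk_pdf = pdf then some chunk
    else pvLoop1 url pdf rest

-- second for-loop of A: title containment match
def pvLoop2 (title : String) : List (List (String × String)) → Option (List (String × String))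
  | [] => none
  | chunk :: rest =>
    if title ≠ "" ∧ PySem.Str.isIn title (pvGetS chunk "title") = true then some chunk
    else pvLoop2 title rest

def find_chunk_for_source_py (source : List (String × String)) (chunks : List (List (String × String))) : List (String × String) :=
  let url := pvGetS source "url"
  let title := pvGetS source "title"
  let pdf_filename := pvGetS source "pdf_filename"
  match pvLoop1 url pdf_filename chunks with
  | some chunk => chunk
  | none =>
    match pvLoop2 title chunks with
    | some chunk => chunk
    | none => []

-- ===== PORT B =====
-- B's single pass; title_match is the Option accumulator
def pvAltLoop (url pdf title : String) :
    List (List (String × String)) → Option (List (String × String)) → List (String × String)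
  | [], title_match => title_match.getD []
  | chunk :: rest, title_match =>
    if url ≠ "" ∧ pvGetS chunk "url" = url then chunk
    else if pdf ≠ "" ∧ pvGetS chunk "pdf_filename" = pdf then chunk
    else
      pvAltLoop url pdf title rest
        (if title_match = none ∧ title ≠ "" ∧ PySem.Str.isIn title (pvGetS chunk "title") = true
         then some chunk else title_match)

def find_chunk_for_source_py_alt (source : List (String × String)) (chunks : List (List (String × String))) : List (String × String) :=
  let url := pvGetS source "url"
  let title := pvGetS source "title"
  let pdf_filename := pvGetS source "pdf_filename"
  pvAltLoop url pdf_filename title chunks none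

-- ===== PRECONDITION & SPEC =====
def Spec_find_chunk_for_source_py (source : List (String × String)) (chunks : List (List (String × String))) (out : List (String × String)) : Prop := out = find_chunk_for_source_py_alt source chunks
instance (source : List (String × String)) (chunks : List (List (String × String))) (out : List (String × String)) : Decidable (Spec_find_chunk_for_source_py source chunks out) := by unfold Spec_find_chunk_for_source_py; infer_instance

-- ===== CLAIM (what is proved, stated in full; the proofs are below) =====
def Claim_equal_find_chunk_for_source_py : Prop := ∀ (source : List (String × String)) (chunks : List (List (String × String))), Dom_find_chunk_for_source_py source chunks → Spec_find_chunk_for_source_py source chunks (find_chunk_for_source_py source chunks)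

-- ===== LEMMAS AND PROOFS =====
-- Invariant of B's single pass: it equals A's first pass, falling back to the
-- already-recorded title candidate or A's second pass.
theorem pvAltLoop_eq (url pdf title : String) (chunks : List (List (String × String)))
    (tm : Option (List (String × String))) :
    pvAltLoop url pdf title chunks tm =
      match pvLoop1 url pdf chunks with
      | some c => c
      | none =>
        match tm with
        | some t => t
        | none => (pvLoop2 title chunks).getD [] := by
  induction chunks generalizing tm with
  | nil => cases tm <;> simp [pvAltLoop, pvLoop1, pvLoop2]
  | cons chunk rest ih =>
    simp only [pvAltLoop, pvLoop1, pvLoop2]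
    split_ifs with h1 h2 h3 <;>
      simp only [ih] <;> cases tm <;> simp_all

theorem find_chunk_for_source_py_spec : Claim_equal_find_chunk_for_source_py := by
  intro source chunks _
  unfold Spec_find_chunk_for_source_py find_chunk_for_source_py find_chunk_for_source_py_alt
  rw [pvAltLoop_eq]
  cases h1 : pvLoop1 (pvGetS source "url") (pvGetS source "pdf_filename") chunks <;>
    cases h2 : pvLoop2 (pvGetS source "title") chunks <;> simp [h1, h2]
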